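-- pv_equiv track=rewrite | github.com/wangxso/llmalpha | llmalpha/agent/prompts/templates.py | _extract_logic_summary
-- ===== SOURCE A (Python) =====
-- def _extract_logic_summary(logic: str) -> str:
--     """
--     Extract a human-readable summary from strategy logic/code.
--
--     Looks for key patterns like:
--     - Entry conditions
--     - Exit conditions
--     - Key indicators used
--     - Parameter values
--     """
--     if not logic:
--         return "Not specified"
--
--     summary_parts = []
--
--     # Look for common indicator patterns
--     indicators = []
--     if "rsi" in logic.lower():
--         indicators.append("RSI")
--     if "macd" in logic.lower():
--         indicators.append("MACD")
--     if "ema" in logic.lower() or "sma" in logic.lower():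
--         indicators.append("Moving Averages")
--     if "bollinger" in logic.lower() or "bb_" in logic.lower():
--         indicators.append("Bollinger Bands")
--     if "atr" in logic.lower():
--         indicators.append("ATR")
--     if "donchian" in logic.lower():
--         indicators.append("Donchian Channel")
--     if "volume" in logic.lower():
--         indicators.append("Volume")
--     if "funding" in logic.lower():
--         indicators.append("Funding Rate")
--
--     if indicators:
--         summary_parts.append(f"Uses: {', '.join(indicators)}")
--
--     # Look for entry/exit patterns in docstrings or comments
--     lines = logic.split('\n')
--     for line in lines:
--         line_lower = line.lower().strip()
--         if 'entry' in line_lower and ':' in line: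
--             entry_desc = line.split(':', 1)[-1].strip()[:100]
--             if entry_desc and not entry_desc.startswith('#'):
--                 summary_parts.append(f"Entry: {entry_desc}")
--                 break
--
--     for line in lines:
--         line_lower = line.lower().strip()
--         if 'exit' in line_lower and ':' in line:
--             exit_desc = line.split(':', 1)[-1].strip()[:100]
--             if exit_desc and not exit_desc.startswith('#'):
--                 summary_parts.append(f"Exit: {exit_desc}")
--                 break
--
--     if summary_parts:
--         return "; ".join(summary_parts)
--
--     # Fallback: return first meaningful line from docstring
--     for line in lines[:10]:
--         line = line.strip().strip('"\'')
--         if line and not line.startswith(('#', 'class', 'def', 'import', '@')):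
--             return line[:150]
--
--     return "See code for details"
-- ===== SOURCE B (Python) =====
-- def _extract_logic_summary(logic: str) -> str:
--     if not logic:
--         return "Not specified"
--
--     low = logic.lower()
--     table = [
--         ("RSI", ["rsi"]),
--         ("MACD", ["macd"]),
--         ("Moving Averages", ["ema", "sma"]),
--         ("Bollinger Bands", ["bollinger", "bb_"]),
--         ("ATR", ["atr"]),
--         ("Donchian Channel", ["donchian"]),
--         ("Volume", ["volume"]),
--         ("Funding Rate", ["funding"]),
--     ]
--     indicators = [label for label, kws in table if any(k in low for k in kws)]
--
--     parts = []
--     if indicators: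
--         parts.append("Uses: " + ", ".join(indicators))
--
--     lines = logic.split('\n')
--     entry = None
--     exit_ = None
--     for line in lines:
--         if entry is not None and exit_ is not None:
--             break
--         if ':' in line:
--             line_lower = line.lower().strip()
--             desc = line.split(':', 1)[1].strip()[:100]
--             if desc and not desc.startswith('#'):
--                 if entry is None and 'entry' in line_lower:
--                     entry = desc
--                 if exit_ is None and 'exit' in line_lower:
--                     exit_ = desc
--     if entry is not None:
--         parts.append("Entry: " + entry)
--     if exit_ is not None:
--         parts.append("Exit: " + exit_)
--
--     if parts:
--         return "; ".join(parts)
--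
--     for line in lines[:10]:
--         line = line.strip().strip('"\'')
--         if line and not line.startswith(('#', 'class', 'def', 'import', '@')):
--             return line[:150]
--
--     return "See code for details"
-- ===== Notes on version B (the rewrite author's own statement) =====
-- stated objective: simpler
-- what changed: B replaces A's two separate full scans over the lines (one for the Entry description, one for Exit) by a single pass that tracks both flags at once with an early stop, and replaces the eight-branch indicator if-ladder by one comprehension over a (label, keywords) table.
import Mathlib
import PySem

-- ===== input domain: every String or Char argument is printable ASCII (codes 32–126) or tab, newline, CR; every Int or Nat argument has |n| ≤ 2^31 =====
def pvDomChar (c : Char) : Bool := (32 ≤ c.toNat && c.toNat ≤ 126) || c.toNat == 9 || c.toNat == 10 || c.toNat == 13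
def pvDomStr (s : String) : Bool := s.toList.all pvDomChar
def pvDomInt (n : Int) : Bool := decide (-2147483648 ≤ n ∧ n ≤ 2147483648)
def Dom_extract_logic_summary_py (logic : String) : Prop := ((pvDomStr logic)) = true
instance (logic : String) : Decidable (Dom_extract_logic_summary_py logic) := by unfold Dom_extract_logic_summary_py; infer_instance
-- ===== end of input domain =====

-- B replaces A's two separate entry/exit scans over the lines by one single pass tracking both,
-- and the eight-branch indicator ladder by a table-driven comprehension (objective: simpler).

-- shared by both ports (the very same Python subexpression occurs in A and in B):
-- line.split(':', 1)[-1].strip()[:100]; the two .getD defaults are unreachable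
-- (split with a nonempty separator is `some` of a nonempty list).
def pvSplitDesc (line : String) : String :=
  PySem.Str.slice
    (PySem.Str.strip ((PySem.List.pyGet? ((PySem.Str.splitMax? line ":" 1).getD []) (-1)).getD ""))
    none (some 100)

-- shared fallback loop (textually identical in A and in Source B):
-- first stripped line not starting with '#', 'class', 'def', 'import', '@'
def pvFallback : List String → String
  | [] => "See code for details"
  | line :: rest =>
    let l := PySem.Str.stripChars (PySem.Str.strip line) "\"'"
    if !(l == "") &&
       !(PySem.Str.startswith l "#" || PySem.Str.startswith l "class" ||
         PySem.Str.startswith l "def" || PySem.Str.startswith l "import" ||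
         PySem.Str.startswith l "@") then
      PySem.Str.slice l none (some 150)
    else pvFallback rest

-- ===== PORT A =====
-- A's first for-loop: scan for the first matching 'entry' line, appending to summary_parts
def pvEntryLoopA (parts : List String) : List String → List String
  | [] => parts
  | line :: rest =>
    let line_lower := PySem.Str.strip (PySem.Str.lower line)
    if PySem.Str.isIn "entry" line_lower && PySem.Str.isIn ":" line then
      let desc := pvSplitDesc line
      if !(desc == "") && !PySem.Str.startswith desc "#" then parts ++ ["Entry: " ++ desc]
      else pvEntryLoopA parts rest
    else pvEntryLoopA parts rest

-- A's second for-loop, same for 'exit'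
def pvExitLoopA (parts : List String) : List String → List String
  | [] => parts
  | line :: rest =>
    let line_lower := PySem.Str.strip (PySem.Str.lower line)
    if PySem.Str.isIn "exit" line_lower && PySem.Str.isIn ":" line then
      let desc := pvSplitDesc line
      if !(desc == "") && !PySem.Str.startswith desc "#" then parts ++ ["Exit: " ++ desc]
      else pvExitLoopA parts rest
    else pvExitLoopA parts rest

def extract_logic_summary_py (logic : String) : String :=
  if logic == "" then "Not specified" else
  let i0 : List String := []
  let i1 := if PySem.Str.isIn "rsi" (PySem.Str.lower logic) then i0 ++ ["RSI"] else i0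
  let i2 := if PySem.Str.isIn "macd" (PySem.Str.lower logic) then i1 ++ ["MACD"] else i1
  let i3 := if PySem.Str.isIn "ema" (PySem.Str.lower logic) || PySem.Str.isIn "sma" (PySem.Str.lower logic) then i2 ++ ["Moving Averages"] else i2
  let i4 := if PySem.Str.isIn "bollinger" (PySem.Str.lower logic) || PySem.Str.isIn "bb_" (PySem.Str.lower logic) then i3 ++ ["Bollinger Bands"] else i3
  let i5 := if PySem.Str.isIn "atr" (PySem.Str.lower logic) then i4 ++ ["ATR"] else i4
  let i6 := if PySem.Str.isIn "donchian" (PySem.Str.lower logic) then i5 ++ ["Donchian Channel"] else i5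
  let i7 := if PySem.Str.isIn "volume" (PySem.Str.lower logic) then i6 ++ ["Volume"] else i6
  let indicators := if PySem.Str.isIn "funding" (PySem.Str.lower logic) then i7 ++ ["Funding Rate"] else i7
  let parts0 : List String := if indicators.isEmpty then [] else ["Uses: " ++ PySem.Str.join ", " indicators]
  let lines := (PySem.Str.split? logic "\n").getD []     -- separator nonempty ⇒ always `some`
  let parts1 := pvEntryLoopA parts0 lines
  let parts2 := pvExitLoopA parts1 lines
  if !parts2.isEmpty then PySem.Str.join "; " parts2
  else pvFallback (PySem.List.slice lines none (some 10))

-- ===== PORT B =====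
def pvIndTable : List (String × List String) :=
  [("RSI", ["rsi"]), ("MACD", ["macd"]), ("Moving Averages", ["ema", "sma"]),
   ("Bollinger Bands", ["bollinger", "bb_"]), ("ATR", ["atr"]),
   ("Donchian Channel", ["donchian"]), ("Volume", ["volume"]), ("Funding Rate", ["funding"])]

-- B's single pass over the lines: fill the first Entry and the first Exit description
def pvScanB : List String → Option String → Option String → Option String × Option String
  | [], e, x => (e, x)
  | line :: rest, e, x =>
    if e.isSome && x.isSome then (e, x)
    else if !PySem.Str.isIn ":" line then pvScanB rest e x
    else
      let desc := pvSplitDesc line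
      if desc == "" || PySem.Str.startswith desc "#" then pvScanB rest e x
      else
        let line_lower := PySem.Str.strip (PySem.Str.lower line)
        let e' := if e.isNone && PySem.Str.isIn "entry" line_lower then some desc else e
        let x' := if x.isNone && PySem.Str.isIn "exit" line_lower then some desc else x
        pvScanB rest e' x'

def extract_logic_summary_py_alt (logic : String) : String :=
  if logic == "" then "Not specified" else
  let low := PySem.Str.lower logic
  let indicators := (pvIndTable.filter (fun p => p.2.any (fun k => PySem.Str.isIn k low))).map (·.1)
  let parts0 : List String := if indicators.isEmpty then [] else ["Uses: " ++ PySem.Str.join ", " indicators]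
  let lines := (PySem.Str.split? logic "\n").getD []     -- separator nonempty ⇒ always `some`
  let ex := pvScanB lines none none
  let parts1 := match ex.1 with | some d => parts0 ++ ["Entry: " ++ d] | none => parts0
  let parts2 := match ex.2 with | some d => parts1 ++ ["Exit: " ++ d] | none => parts1
  if !parts2.isEmpty then PySem.Str.join "; " parts2
  else pvFallback (PySem.List.slice lines none (some 10))

-- ===== PRECONDITION & SPEC =====
def Spec_extract_logic_summary_py (logic : String) (out : String) : Prop := out = extract_logic_summary_py_alt logic
instance (logic : String) (out : String) : Decidable (Spec_extract_logic_summary_py logic out) := by unfold Spec_extract_logic_summary_py; infer_instance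

-- ===== CLAIM (what is proved, stated in full; the proofs are below) =====
def Claim_equal_extract_logic_summary_py : Prop := ∀ (logic : String), Dom_extract_logic_summary_py logic → Spec_extract_logic_summary_py logic (extract_logic_summary_py logic)

-- ===== LEMMAS AND PROOFS =====

-- the first 'entry' line's description, in A's condition shape
def pvFindE : List String → Option String
  | [] => none
  | line :: rest =>
    let line_lower := PySem.Str.strip (PySem.Str.lower line)
    if PySem.Str.isIn "entry" line_lower && PySem.Str.isIn ":" line then
      let desc := pvSplitDesc line
      if !(desc == "") && !PySem.Str.startswith desc "#" then some desc
      else pvFindE rest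
    else pvFindE rest

def pvFindX : List String → Option String
  | [] => none
  | line :: rest =>
    let line_lower := PySem.Str.strip (PySem.Str.lower line)
    if PySem.Str.isIn "exit" line_lower && PySem.Str.isIn ":" line then
      let desc := pvSplitDesc line
      if !(desc == "") && !PySem.Str.startswith desc "#" then some desc
      else pvFindX rest
    else pvFindX rest

theorem entryLoopA_eq (lines : List String) (parts : List String) :
    pvEntryLoopA parts lines =
      parts ++ (match pvFindE lines with | some d => ["Entry: " ++ d] | none => []) := by
  induction lines generalizing parts with
  | nil => simp [pvEntryLoopA, pvFindE]
  | cons line rest ih =>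
    simp only [pvEntryLoopA, pvFindE]
    split_ifs <;> simp [ih]

theorem exitLoopA_eq (lines : List String) (parts : List String) :
    pvExitLoopA parts lines =
      parts ++ (match pvFindX lines with | some d => ["Exit: " ++ d] | none => []) := by
  induction lines generalizing parts with
  | nil => simp [pvExitLoopA, pvFindX]
  | cons line rest ih =>
    simp only [pvExitLoopA, pvFindX]
    split_ifs <;> simp [ih]

set_option maxHeartbeats 2000000 in
theorem scanB_eq (lines : List String) : ∀ e x : Option String,
    pvScanB lines e x =
      ((match e with | some d => some d | none => pvFindE lines),
       (match x with | some d => some d | none => pvFindX lines)) := by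
  induction lines with
  | nil => intro e x; cases e <;> cases x <;> rfl
  | cons line rest ih =>
    intro e x
    cases e <;> cases x <;>
      simp only [pvScanB, pvFindE, pvFindX, Option.isSome_some, Option.isSome_none,
        Option.isNone_some, Option.isNone_none, Bool.and_self, Bool.and_false, Bool.false_and,
        Bool.true_and, Bool.and_true, Bool.false_eq_true, if_true, if_false, ih] <;>
      split_ifs <;> simp_all

theorem filterMap_eq_flatMap {α β : Type} (f : α → Bool) (g : α → β) (l : List α) :
    (l.filter f).map g = l.flatMap (fun a => if f a then [g a] else []) := by
  induction l with
  | nil => rfl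
  | cons a l ih => by_cases h : f a <;> simp [h, ih]

set_option maxHeartbeats 1000000 in
theorem ind_eq (logic : String) :
    (let i0 : List String := []
     let i1 := if PySem.Str.isIn "rsi" (PySem.Str.lower logic) then i0 ++ ["RSI"] else i0
     let i2 := if PySem.Str.isIn "macd" (PySem.Str.lower logic) then i1 ++ ["MACD"] else i1
     let i3 := if PySem.Str.isIn "ema" (PySem.Str.lower logic) || PySem.Str.isIn "sma" (PySem.Str.lower logic) then i2 ++ ["Moving Averages"] else i2
     let i4 := if PySem.Str.isIn "bollinger" (PySem.Str.lower logic) || PySem.Str.isIn "bb_" (PySem.Str.lower logic) then i3 ++ ["Bollinger Bands"] else i3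
     let i5 := if PySem.Str.isIn "atr" (PySem.Str.lower logic) then i4 ++ ["ATR"] else i4
     let i6 := if PySem.Str.isIn "donchian" (PySem.Str.lower logic) then i5 ++ ["Donchian Channel"] else i5
     let i7 := if PySem.Str.isIn "volume" (PySem.Str.lower logic) then i6 ++ ["Volume"] else i6
     if PySem.Str.isIn "funding" (PySem.Str.lower logic) then i7 ++ ["Funding Rate"] else i7) =
    (pvIndTable.filter (fun p => p.2.any (fun k => PySem.Str.isIn k (PySem.Str.lower logic)))).map (·.1) := by
  have hpull : ∀ (c : Bool) (t a : List String), (if c = true then t ++ a else t) = t ++ (if c = true then a else []) := by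
    intro c t a; cases c <;> simp
  rw [filterMap_eq_flatMap]
  simp only [pvIndTable, List.flatMap_cons, List.flatMap_nil, List.any_cons, List.any_nil,
    Bool.or_false]
  simp only [hpull]
  simp only [List.nil_append, List.append_nil, List.append_assoc]

-- ===== VERDICT (by name: the statement is the Claim_ definition above) =====
set_option maxHeartbeats 2000000 in
theorem extract_logic_summary_py_spec : Claim_equal_extract_logic_summary_py := by
  intro logic _
  unfold Spec_extract_logic_summary_py
  by_cases hl : logic == ""
  · simp [extract_logic_summary_py, extract_logic_summary_py_alt, hl]
  · simp only [extract_logic_summary_py, extract_logic_summary_py_alt, hl, Bool.false_eq_true,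
      if_false, entryLoopA_eq, exitLoopA_eq, scanB_eq, ind_eq]
    cases hE : pvFindE ((PySem.Str.split? logic "\n").getD []) <;>
    cases hX : pvFindX ((PySem.Str.split? logic "\n").getD []) <;>
    simp only [List.append_nil]
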